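-- pv_equiv track=rewrite | github.com/safe-refuge/safeway-data | utils/phone_numbers.py | get_human_phone_numbers
-- ===== SOURCE A (Python) =====
-- def get_human_phone_numbers(parsed: str, phone: str, internal_number_length: int) -> list[str]:
--     _characters = list(phone)
--
--     parsed = parsed.lstrip()
--
--     if len([p for p in clean_leading_chars_phone(parsed) if is_digit(p)]) == internal_number_length:
--         return [parsed] + get_human_phone_numbers('', phone, internal_number_length)
--
--     if len(phone) == 0:
--         return [parsed] if len(parsed) == internal_number_length else []
--
--     first = _characters[0]
--     rest = _characters[1:]
--
--     return get_human_phone_numbers(parsed + first, ''.join(rest), internal_number_length)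
--
-- def clean_leading_chars_phone(phone):
--     phone = phone.lstrip('(')
--     phone = phone.lstrip('0')
--     return phone
--
-- def is_digit(alphabet: str) -> bool:
--     return alphabet in '0123456789'
-- ===== SOURCE B (Python) =====
-- def get_human_phone_numbers(parsed: str, phone: str, internal_number_length: int) -> list[str]:
--     n = internal_number_length
--     out = []
--     cur = parsed.lstrip()
--     zone = 0   # 0: cleaned form of cur empty, only '(' seen; 1: '('s then >=1 '0'; 2: body reached
--     count = 0  # number of digits in the cleaned form of cur
--     for ch in cur:
--         zone, count = _step(zone, count, ch)
--     for ch in phone: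
--         if count == n:
--             out.append(cur)
--             cur, zone, count = '', 0, 0
--         if not cur and ch.isspace():
--             continue
--         cur += ch
--         zone, count = _step(zone, count, ch)
--     if count == n:
--         out.append(cur)
--         cur = ''
--     if len(cur) == n:
--         out.append(cur)
--     return out
--
-- def _step(zone, count, ch):
--     if zone == 0:
--         if ch == '(':
--             return 0, count
--         if ch == '0':
--             return 1, count
--         return 2, count + ch.isdigit()
--     if zone == 1:
--         if ch == '0':
--             return 1, count
--         if ch == '(':
--             return 2, count
--         return 2, count + ch.isdigit()
--     return 2, count + ch.isdigit()
-- ===== Notes on version B (the rewrite author's own statement) =====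
-- stated objective: faster
-- what changed: Replaced A's recursion (which rebuilds the accumulated string and recounts its cleaned digits from scratch at every character) by a single forward pass that maintains the cleaned-digit count and a 3-state prefix phase ('(' run / '0' run / body) incrementally.
import Mathlib
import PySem

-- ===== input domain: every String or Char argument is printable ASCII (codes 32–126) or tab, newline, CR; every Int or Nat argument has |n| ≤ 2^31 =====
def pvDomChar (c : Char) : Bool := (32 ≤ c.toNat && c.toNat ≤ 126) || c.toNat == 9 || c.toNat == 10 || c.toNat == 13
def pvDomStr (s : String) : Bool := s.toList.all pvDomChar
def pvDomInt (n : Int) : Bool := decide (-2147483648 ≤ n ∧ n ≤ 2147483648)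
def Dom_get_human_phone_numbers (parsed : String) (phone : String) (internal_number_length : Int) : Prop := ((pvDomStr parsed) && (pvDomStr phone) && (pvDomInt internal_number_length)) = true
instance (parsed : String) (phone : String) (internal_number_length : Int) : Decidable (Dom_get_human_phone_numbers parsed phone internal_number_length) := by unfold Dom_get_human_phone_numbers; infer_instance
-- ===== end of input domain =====

-- B replaces A's recursion (re-counting the cleaned digits of the whole accumulated string at every
-- character) by one forward pass keeping the cleaned-digit count and a 3-state prefix phase incrementally.


-- ===== PORT A =====
-- is_digit(p): 'p in "0123456789"' for a single character = list membership (exact)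
def pvIsDigitA (c : Char) : Bool := "0123456789".toList.contains c
-- clean_leading_chars_phone: s.lstrip('(') then .lstrip('0'); for a one-character strip set,
-- Python's lstrip(chars) is exactly dropWhile (· == that char)
def pvClean (s : List Char) : List Char := (s.dropWhile (· == '(')).dropWhile (· == '0')
-- len([p for p in clean_leading_chars_phone(parsed) if is_digit(p)])
def pvCountA (s : List Char) : Nat := ((pvClean s).filter pvIsDigitA).length

-- A's recursion, with a fuel guard that only makes the same computation total
-- (2*|phone|+3 calls always suffice on the terminating inputs admitted by Pre_)
def goA : Nat → List Char → List Char → Int → List (List Char)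
  | 0, _, _, _ => []
  | fuel+1, parsed0, phone, n =>
    let parsed := PySem.Chars.lstrip parsed0
    if (pvCountA parsed : Int) = n then
      parsed :: goA fuel [] phone n
    else
      match phone with
      | [] => if (parsed.length : Int) = n then [parsed] else []
      | first :: rest => goA fuel (parsed ++ [first]) rest n

def get_human_phone_numbers (parsed : String) (phone : String) (internal_number_length : Int) : List String :=
  (goA (2 * phone.toList.length + 3) parsed.toList phone.toList internal_number_length).map String.ofList

-- ===== PORT B =====
-- _step(zone, count, ch) of Source B
def pvStep (st : Nat × Nat) (c : Char) : Nat × Nat :=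
  match st with
  | (0, cnt) =>
    if c == '(' then (0, cnt)
    else if c == '0' then (1, cnt)
    else (2, cnt + (if PySem.Chars.isdigit c then 1 else 0))
  | (1, cnt) =>
    if c == '0' then (1, cnt)
    else if c == '(' then (2, cnt)
    else (2, cnt + (if PySem.Chars.isdigit c then 1 else 0))
  | (_, cnt) => (2, cnt + (if PySem.Chars.isdigit c then 1 else 0))

-- Source B's main 'for ch in phone' loop plus the two final checks
def goB (phone : List Char) (cur : List Char) (z cnt : Nat) (n : Int) (out : List (List Char)) : List (List Char) :=
  match phone with
  | [] =>
    let st := if (cnt : Int) = n then (out ++ [cur], ([] : List Char)) else (out, cur)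
    match st with
    | (out, cur) => if (cur.length : Int) = n then out ++ [cur] else out
  | c :: cs =>
    let st := if (cnt : Int) = n then (out ++ [cur], ([] : List Char), 0, 0) else (out, cur, z, cnt)
    match st with
    | (out, cur, z, cnt) =>
      if cur.isEmpty && PySem.Chars.isspace c then goB cs cur z cnt n out
      else goB cs (cur ++ [c]) (pvStep (z, cnt) c).1 (pvStep (z, cnt) c).2 n out

def get_human_phone_numbers_alt (parsed : String) (phone : String) (internal_number_length : Int) : List String :=
  (goB phone.toList (PySem.Chars.lstrip parsed.toList)
    ((PySem.Chars.lstrip parsed.toList).foldl pvStep (0, 0)).1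
    ((PySem.Chars.lstrip parsed.toList).foldl pvStep (0, 0)).2 internal_number_length []).map String.ofList

-- ===== PRECONDITION & SPEC =====
-- Pre_ excludes exactly the inputs on which A never returns (infinite recursion): when
-- internal_number_length = 0 and the cleaned, left-stripped parsed prefix contains no digit,
-- A re-emits the empty segment forever.
def Pre_get_human_phone_numbers (parsed : String) (phone : String) (internal_number_length : Int) : Prop :=
  internal_number_length ≠ 0 ∨ (pvCountA (PySem.Chars.lstrip parsed.toList) : Int) ≠ 0
instance (parsed : String) (phone : String) (internal_number_length : Int) : Decidable (Pre_get_human_phone_numbers parsed phone internal_number_length) := by unfold Pre_get_human_phone_numbers; infer_instance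
def pvWitness_get_human_phone_numbers : String × String × Int := ("", "(08 12-34", 4)

def Spec_get_human_phone_numbers (parsed : String) (phone : String) (internal_number_length : Int) (out : List String) : Prop := out = get_human_phone_numbers_alt parsed phone internal_number_length
instance (parsed : String) (phone : String) (internal_number_length : Int) (out : List String) : Decidable (Spec_get_human_phone_numbers parsed phone internal_number_length out) := by unfold Spec_get_human_phone_numbers; infer_instance

-- ===== CLAIM (what is proved, stated in full; the proofs are below) =====
def Claim_equal_get_human_phone_numbers : Prop := ∀ (parsed : String) (phone : String) (internal_number_length : Int), Dom_get_human_phone_numbers parsed phone internal_number_length → Pre_get_human_phone_numbers parsed phone internal_number_length → Spec_get_human_phone_numbers parsed phone internal_number_length (get_human_phone_numbers parsed phone internal_number_length)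

-- ===== LEMMAS AND PROOFS =====

-- the digit test of A (list membership) and of B (character range) agree
theorem pvIsDigitA_eq : pvIsDigitA = PySem.Chars.isdigit := by
  funext c
  have hlit : ("0123456789".toList) = ['0','1','2','3','4','5','6','7','8','9'] := by rfl
  simp only [pvIsDigitA, hlit, PySem.Chars.isdigit]
  simp only [List.contains_eq_mem, List.mem_cons, List.not_mem_nil, or_false, Char.ext_iff,
    Char.le_def]
  rw [Bool.eq_iff_iff]
  simp only [decide_eq_true_eq, Bool.and_eq_true, UInt32.le_iff_toNat_le, UInt32.ext_iff]
  rcases c with ⟨⟨⟨v, hv⟩⟩, h2⟩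
  simp only [UInt32.toNat]
  constructor
  · rintro (h|h|h|h|h|h|h|h|h|h) <;> simp_all
  · rintro ⟨ha, hb⟩
    simp_all
    omega

theorem filter_digit_len_single (c : Char) :
    (List.filter pvIsDigitA [c]).length = if PySem.Chars.isdigit c then 1 else 0 := by
  simp [List.filter, pvIsDigitA_eq]; split <;> simp_all

-- the "phase" of the accumulated prefix, as recomputed from scratch
def zoneOf (s : List Char) : Nat :=
  if s.all (· == '(') then 0
  else if (s.dropWhile (· == '(')).all (· == '0') then 1
  else 2

-- one _step of Source B advances the recomputed phase/count correctly
theorem step_compat (s : List Char) (c : Char) :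
    pvStep (zoneOf s, pvCountA s) c = (zoneOf (s ++ [c]), pvCountA (s ++ [c])) := by
  by_cases h1 : s.all (· == '(')
  · -- zone 0
    have hd : List.dropWhile (· == '(') s = [] := List.dropWhile_eq_nil_iff.mpr (by
      intro x hx; exact (List.all_eq_true.mp h1) x hx)
    have hcnt : pvCountA s = 0 := by simp [pvCountA, pvClean, hd]
    have hz : zoneOf s = 0 := by simp [zoneOf, h1]
    rw [hz, hcnt]
    by_cases hc : c = '('
    · subst hc
      have : (s ++ ['(']).all (· == '(') = true := by simp [List.all_append, h1]
      simp [pvStep, zoneOf, this, pvCountA, pvClean, List.dropWhile_append, hd]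
    · by_cases hc0 : c = '0'
      · subst hc0
        have ha : (s ++ ['0']).all (· == '(') = false := by simp [List.all_append]
        simp [pvStep, zoneOf, ha, pvCountA, pvClean, List.dropWhile_append, hd]
      · have ha : (s ++ [c]).all (· == '(') = false := by simp [List.all_append, hc]
        have hcf : (c == '(') = false := by simp [hc]
        have hc0f : (c == '0') = false := by simp [hc0]
        simp only [pvStep, zoneOf, ha, pvCountA, pvClean, List.dropWhile_append, hd,
          List.dropWhile, hcf, hc0f, Bool.false_eq_true, if_false, List.isEmpty_nil,
          if_true, Prod.mk.injEq]
        constructor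
        · simp [List.dropWhile, hc0f]
        · simp [List.dropWhile, hc0f, (filter_digit_len_single c).symm]
  · -- s not all '(' : the paren-stripped part is nonempty
    have hne : List.dropWhile (· == '(') s ≠ [] := by
      intro h
      exact h1 (List.all_eq_true.mpr (fun x hx => List.dropWhile_eq_nil_iff.mp h x hx))
    have hda : List.dropWhile (· == '(') (s ++ [c]) = List.dropWhile (· == '(') s ++ [c] := by
      rw [List.dropWhile_append]
      simp [List.isEmpty_iff, hne]
    have h1f : (s.all (· == '(')) = false := by simpa using h1
    have ha1 : (s ++ [c]).all (· == '(') = false := by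
      simp [List.all_append, h1f]
    by_cases h2 : (List.dropWhile (· == '(') s).all (· == '0')
    · -- zone 1
      have hz : zoneOf s = 1 := by simp [zoneOf, h1, h2]
      have hd0 : List.dropWhile (· == '0') (List.dropWhile (· == '(') s) = [] :=
        List.dropWhile_eq_nil_iff.mpr (fun x hx => (List.all_eq_true.mp h2) x hx)
      have hcnt : pvCountA s = 0 := by simp [pvCountA, pvClean, hd0]
      rw [hz, hcnt]
      by_cases hc0 : c = '0'
      · subst hc0
        have h2' : (List.dropWhile (· == '(') (s ++ ['0'])).all (· == '0') = true := by
          rw [hda, List.all_append]; simp [h2]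
        rw [hda] at h2'
        simp [pvStep, zoneOf, ha1, h2', pvCountA, pvClean, hda, List.dropWhile_append,
          List.isEmpty_iff, hd0, List.dropWhile]
      · have h2' : (List.dropWhile (· == '(') (s ++ [c])).all (· == '0') = false := by
          rw [hda, List.all_append]; simp [beq_iff_eq, hc0]
        by_cases hc : c = '('
        · subst hc
          simp [pvStep, zoneOf, ha1, h2', pvCountA, pvClean, hda, List.dropWhile_append,
            List.isEmpty_iff, hd0, List.dropWhile, filter_digit_len_single,
            PySem.Chars.isdigit]
        · have hc0f : (c == '0') = false := by simp [hc0]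
          rw [hda] at h2'
          simp [pvStep, beq_iff_eq, hc, hc0, zoneOf, ha1, h2', pvCountA, pvClean, hda,
            List.dropWhile_append, List.isEmpty_iff, hd0, List.dropWhile, hc0f,
            filter_digit_len_single]
    · -- zone 2
      have hz : zoneOf s = 2 := by simp [zoneOf, h1, h2]
      have hne0 : List.dropWhile (· == '0') (List.dropWhile (· == '(') s) ≠ [] := by
        intro h
        exact h2 (List.all_eq_true.mpr (fun x hx => List.dropWhile_eq_nil_iff.mp h x hx))
      have h2f : ((List.dropWhile (· == '(') s).all (· == '0')) = false := by simpa using h2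
      have h2' : (List.dropWhile (· == '(') (s ++ [c])).all (· == '0') = false := by
        rw [hda]; simp [List.all_append, h2f]
      have hclean : pvClean (s ++ [c]) = pvClean s ++ [c] := by
        unfold pvClean
        rw [hda, List.dropWhile_append]
        simp [List.isEmpty_iff, hne0]
      rw [hz]
      simp [pvStep, zoneOf, ha1, h2', pvCountA, hclean, List.filter_append,
        filter_digit_len_single]

-- Source B's initial phase/count scan recomputes (zoneOf, pvCountA)
theorem state_spec (s : List Char) : s.foldl pvStep (0, 0) = (zoneOf s, pvCountA s) := by
  induction s using List.reverseRecOn with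
  | nil => rfl
  | append_singleton s c ih => rw [List.foldl_append, ih]; simpa using step_compat s c

theorem pvStep_snd_ge (z cnt : Nat) (c : Char) : cnt ≤ (pvStep (z, cnt) c).2 := by
  unfold pvStep
  match z with
  | 0 => split_ifs <;> simp <;> omega
  | 1 => split_ifs <;> simp <;> omega
  | _+2 => simp

theorem count_mono (s : List Char) (c : Char) : pvCountA s ≤ pvCountA (s ++ [c]) := by
  have h := pvStep_snd_ge (zoneOf s) (pvCountA s) c
  rw [step_compat] at h
  exact h

theorem lstrip_idem (s : List Char) :
    PySem.Chars.lstrip (PySem.Chars.lstrip s) = PySem.Chars.lstrip s := by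
  show List.dropWhile _ (List.dropWhile _ s) = List.dropWhile _ s
  induction s with
  | nil => rfl
  | cons a t ih =>
    by_cases h : PySem.Chars.isspace a = true
    · simp [List.dropWhile_cons, h, ih]
    · simp at h; simp [List.dropWhile_cons, h]

-- A's entry lstrip can be applied in advance
theorem goA_lstrip (fuel : Nat) (p phone : List Char) (n : Int) :
    goA (fuel+1) p phone n = goA (fuel+1) (PySem.Chars.lstrip p) phone n := by
  simp [goA, lstrip_idem]

theorem lstrip_snoc_nonnil (s : List Char) (c : Char)
    (hs : PySem.Chars.lstrip s = s) (hne : s ≠ []) :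
    PySem.Chars.lstrip (s ++ [c]) = s ++ [c] := by
  cases s with
  | nil => exact absurd rfl hne
  | cons a t =>
    have h : PySem.Chars.isspace a = false := by
      cases h : PySem.Chars.isspace a with
      | false => rfl
      | true =>
        exfalso
        simp only [PySem.Chars.lstrip, List.dropWhile, h] at hs
        have hlen := List.length_dropWhile_le PySem.Chars.isspace t
        rw [hs] at hlen
        simp at hlen
    simp [PySem.Chars.lstrip, List.dropWhile, h]

theorem lstrip_single_space (c : Char) (h : PySem.Chars.isspace c = true) :
    PySem.Chars.lstrip [c] = [] := by
  simp [PySem.Chars.lstrip, List.dropWhile, h]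

theorem lstrip_single_nonspace (c : Char) (h : PySem.Chars.isspace c = false) :
    PySem.Chars.lstrip [c] = [c] := by
  simp [PySem.Chars.lstrip, List.dropWhile, h]

theorem lstrip_nil : PySem.Chars.lstrip ([] : List Char) = [] := rfl
theorem pvCountA_nil : pvCountA [] = 0 := rfl

theorem main_lemma : ∀ (phone : List Char) (fuel : Nat) (cur : List Char) (n : Int)
    (out : List (List Char)),
    2 * phone.length + 2 ≤ fuel →
    PySem.Chars.lstrip cur = cur →
    (n ≠ 0 ∨ (pvCountA cur : Int) ≠ 0) →
    out ++ goA fuel cur phone n = goB phone cur (zoneOf cur) (pvCountA cur) n out := by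
  intro phone
  induction phone with
  | nil =>
    intro fuel cur n out hfuel hl hinv
    obtain ⟨f, rfl⟩ : ∃ f, fuel = f + 1 := ⟨fuel - 1, by omega⟩
    by_cases hcnt : (pvCountA cur : Int) = n
    · have hn : n ≠ 0 := by
        rcases hinv with h | h
        · exact h
        · intro h0; rw [h0] at hcnt; exact h hcnt
      obtain ⟨f2, rfl⟩ : ∃ f2, f = f2 + 1 := ⟨f - 1, by omega⟩
      have hn0 : ¬ ((0 : Int) = n) := fun h => hn h.symm
      simp [goA, goB, hl, hcnt, hn0, lstrip_nil, pvCountA_nil]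
    · simp only [goA, goB, hl, hcnt, if_neg hcnt, if_false]
      split <;> simp
  | cons c cs ih =>
    intro fuel cur n out hfuel hl hinv
    obtain ⟨f, rfl⟩ : ∃ f, fuel = f + 1 := ⟨fuel - 1, by omega⟩
    simp only [List.length_cons] at hfuel
    by_cases hcnt : (pvCountA cur : Int) = n
    · -- emit, then consume c with empty accumulator
      have hn : n ≠ 0 := by
        rcases hinv with h | h
        · exact h
        · intro h0; rw [h0] at hcnt; exact h hcnt
      obtain ⟨f2, rfl⟩ : ∃ f2, f = f2 + 1 := ⟨f - 1, by omega⟩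
      have hn0 : ¬ ((0 : Int) = n) := fun h => hn h.symm
      have hA : goA (f2 + 1 + 1) cur (c :: cs) n
          = cur :: goA f2 ([] ++ [c]) cs n := by
        simp [goA, hl, hcnt, hn0, lstrip_nil, pvCountA_nil]
      rw [hA]
      have hout : out ++ cur :: goA f2 [c] cs n
          = (out ++ [cur]) ++ goA f2 [c] cs n := by simp
      simp only [List.nil_append] at *
      rw [hout]
      by_cases hsp : PySem.Chars.isspace c = true
      · obtain ⟨f3, rfl⟩ : ∃ f3, f2 = f3 + 1 := ⟨f2 - 1, by omega⟩
        rw [goA_lstrip f3 [c] cs n, lstrip_single_space c hsp]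
        have hB : goB (c :: cs) cur (zoneOf cur) (pvCountA cur) n out
            = goB cs [] 0 0 n (out ++ [cur]) := by
          simp [goB, hcnt, hsp]
        rw [hB]
        have := ih (f3 + 1) [] n (out ++ [cur]) (by omega) rfl (Or.inl hn)
        simpa [zoneOf, pvCountA] using this
      · have hsp' : PySem.Chars.isspace c = false := by simpa using hsp
        have hB : goB (c :: cs) cur (zoneOf cur) (pvCountA cur) n out
            = goB cs [c] (pvStep (0, 0) c).1 (pvStep (0, 0) c).2 n (out ++ [cur]) := by
          simp [goB, hcnt, hsp']
        rw [hB]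
        have hst : pvStep (0, 0) c = (zoneOf [c], pvCountA [c]) := by
          have h := step_compat [] c
          simpa [zoneOf, pvCountA] using h
        rw [hst]
        exact ih f2 [c] n (out ++ [cur]) (by omega)
          (lstrip_single_nonspace c hsp') (Or.inl hn)
    · -- no emit: consume c
      have hA : goA (f + 1) cur (c :: cs) n = goA f (cur ++ [c]) cs n := by
        simp [goA, hl, hcnt]
      rw [hA]
      by_cases hcur : cur = []
      · subst hcur
        have hn : n ≠ 0 := by
          rcases hinv with h | h
          · exact h
          · simp [pvCountA, pvClean] at h
        have hcnt0 : ¬ (((0 : Nat) : Int) = n) := by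
          simpa [pvCountA_nil] using hcnt
        have hn0 : ¬ ((0 : Int) = n) := fun h => hn h.symm
        by_cases hsp : PySem.Chars.isspace c = true
        · obtain ⟨f3, rfl⟩ : ∃ f3, f = f3 + 1 := ⟨f - 1, by omega⟩
          rw [goA_lstrip f3 ([] ++ [c]) cs n]
          simp only [List.nil_append]
          rw [lstrip_single_space c hsp]
          have hB : goB (c :: cs) [] (zoneOf []) (pvCountA []) n out
              = goB cs [] 0 0 n out := by
            simp [goB, hcnt0, hn0, hsp, zoneOf, pvCountA, pvClean]
          rw [hB]
          have := ih (f3 + 1) [] n out (by omega) rfl (Or.inl hn)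
          simpa [zoneOf, pvCountA] using this
        · have hsp' : PySem.Chars.isspace c = false := by simpa using hsp
          have hB : goB (c :: cs) [] (zoneOf []) (pvCountA []) n out
              = goB cs [c] (pvStep (zoneOf [], pvCountA []) c).1
                  (pvStep (zoneOf [], pvCountA []) c).2 n out := by
            simp [goB, hcnt0, hn0, hsp', zoneOf, pvCountA, pvClean]
          rw [hB, step_compat]
          simp only [List.nil_append]
          exact ih f [c] n out (by omega) (lstrip_single_nonspace c hsp') (Or.inl hn)
      · have hl' : PySem.Chars.lstrip (cur ++ [c]) = cur ++ [c] :=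
          lstrip_snoc_nonnil cur c hl hcur
        have hinv' : n ≠ 0 ∨ (pvCountA (cur ++ [c]) : Int) ≠ 0 := by
          rcases hinv with h | h
          · exact Or.inl h
          · refine Or.inr ?_
            have := count_mono cur c
            intro hz
            apply h
            omega
        have hB : goB (c :: cs) cur (zoneOf cur) (pvCountA cur) n out
            = goB cs (cur ++ [c]) (pvStep (zoneOf cur, pvCountA cur) c).1
                (pvStep (zoneOf cur, pvCountA cur) c).2 n out := by
          simp [goB, hcnt, List.isEmpty_iff, hcur]
        rw [hB, step_compat]
        exact ih f (cur ++ [c]) n out (by omega) hl' hinv'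

-- ===== VERDICT (by name: the statement is the Claim_ definition above) =====
theorem get_human_phone_numbers_spec : Claim_equal_get_human_phone_numbers := by
  intro parsed phone n _ hpre
  unfold Spec_get_human_phone_numbers get_human_phone_numbers get_human_phone_numbers_alt
  rw [state_spec]
  rw [show (2 * phone.toList.length + 3) = (2 * phone.toList.length + 2) + 1 from rfl,
    goA_lstrip]
  have h := main_lemma phone.toList (2 * phone.toList.length + 2 + 1)
    (PySem.Chars.lstrip parsed.toList) n [] (by omega) (lstrip_idem _)
    (by unfold Pre_get_human_phone_numbers at hpre; exact hpre)
  simp only [List.nil_append] at h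
  rw [h]
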